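-- pv_equiv track=rewrite | github.com/pabloschwarzenberg/grader | tema11_ej2/tema11_ej2_b6fc47d128d37cf3793cbb4617497ff4.py | validar_expresion
-- ===== SOURCE A (Python) =====
-- def validar_expresion(expresion):
--   numeros=["0","1","2","3","4","5","6","7","8","9"]
--   lista=[]
--   contador=0
--   lista=list(expresion)
--   for i in lista:
--       if i not in numeros:
--           contador+=1
--       if i in numeros:
--           contador=0
--       if contador>1:
--           return False
--   if expresion[len(expresion)-1] not in numeros:
--       return False
--   return True
-- ===== SOURCE B (Python) =====
-- def validar_expresion(expresion):
--     if expresion[-1] not in "0123456789":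
--         return False
--     return all(a in "0123456789" or b in "0123456789"
--                for a, b in zip(expresion, expresion[1:]))
-- ===== Notes on version B (the rewrite author's own statement) =====
-- stated objective: simpler
-- what changed: Replaced the running non-digit counter with reset plus a trailing last-character check by a single last-character test followed by a direct pairwise scan over adjacent characters (zip of the string with its tail).
import Mathlib
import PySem

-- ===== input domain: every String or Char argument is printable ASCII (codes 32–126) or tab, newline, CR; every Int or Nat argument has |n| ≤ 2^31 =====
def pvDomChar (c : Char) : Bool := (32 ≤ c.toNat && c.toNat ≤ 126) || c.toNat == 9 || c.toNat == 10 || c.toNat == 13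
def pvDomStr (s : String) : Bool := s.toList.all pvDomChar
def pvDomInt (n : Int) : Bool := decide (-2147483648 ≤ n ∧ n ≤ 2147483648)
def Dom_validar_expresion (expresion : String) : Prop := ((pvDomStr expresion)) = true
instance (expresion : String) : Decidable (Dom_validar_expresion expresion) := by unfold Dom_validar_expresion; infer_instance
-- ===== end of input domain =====

-- B replaces A's running non-digit counter by a last-character test plus a pairwise scan of adjacent characters (simpler decomposition; return value only).


-- ===== PORT A =====
-- numeros = ["0","1","2","3","4","5","6","7","8","9"]
def pvNumeros : List Char := ['0','1','2','3','4','5','6','7','8','9']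

-- the for-loop over lista with the counter; false = the early 'return False', true = the loop finished
def pvLoopA : List Char → Int → Bool
  | [], _ => true
  | i :: rest, contador =>
    let c1 := if i ∉ pvNumeros then contador + 1 else contador
    let c2 := if i ∈ pvNumeros then 0 else c1
    if c2 > 1 then false else pvLoopA rest c2

def validar_expresion (expresion : String) : Bool :=
  let lista := expresion.toList
  if pvLoopA lista 0 then
    -- expresion[len(expresion)-1]; none = IndexError (empty string), excluded by Pre_
    match PySem.Str.pyGet? expresion ((lista.length : Int) - 1) with
    | none => false
    | some c => if c ∉ pvNumeros then false else true
  else false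

-- ===== PORT B =====
def pvDigit (c : Char) : Bool := decide (c ∈ "0123456789".toList)

def validar_expresion_alt (expresion : String) : Bool :=
  match PySem.Str.pyGet? expresion (-1) with
  | none => false   -- IndexError (empty string), excluded by Pre_
  | some c =>
    if !pvDigit c then false
    else (expresion.toList.zip (expresion.toList.drop 1)).all
           (fun p => pvDigit p.1 || pvDigit p.2)

-- ===== PRECONDITION & SPEC =====
-- A raises IndexError (expresion[-1... len-1]) on the empty string; Pre_ excludes exactly that input (B raises there too).
def Pre_validar_expresion (expresion : String) : Prop := expresion.toList ≠ []
instance (expresion : String) : Decidable (Pre_validar_expresion expresion) := by unfold Pre_validar_expresion; infer_instance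
def pvWitness_validar_expresion : String := "12a3"

def Spec_validar_expresion (expresion : String) (out : Bool) : Prop := out = validar_expresion_alt expresion
instance (expresion : String) (out : Bool) : Decidable (Spec_validar_expresion expresion out) := by unfold Spec_validar_expresion; infer_instance

-- ===== CLAIM (what is proved, stated in full; the proofs are below) =====
def Claim_equal_validar_expresion : Prop := ∀ (expresion : String), Dom_validar_expresion expresion → Pre_validar_expresion expresion → Spec_validar_expresion expresion (validar_expresion expresion)

-- ===== LEMMAS AND PROOFS =====

-- B's adjacent-pair check, as a named function on lists
def pvPairs (l : List Char) : Bool := (l.zip (l.drop 1)).all (fun p => pvDigit p.1 || pvDigit p.2)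

theorem pvStr_toList : "0123456789".toList = pvNumeros := by decide

theorem pvDigit_eq (c : Char) : pvDigit c = decide (c ∈ pvNumeros) := by
  simp [pvDigit, pvStr_toList]

theorem pvPairs_cons (x : Char) (xs : List Char) :
    pvPairs (x :: xs) = (match xs with
                         | [] => true
                         | y :: _ => (pvDigit x || pvDigit y) && pvPairs xs) := by
  cases xs with
  | nil => rfl
  | cons y ys => simp [pvPairs, List.zip]

theorem pvLoopA_zero_one (l : List Char) :
    pvLoopA l 0 = pvPairs l ∧
    pvLoopA l 1 = (match l with
                   | [] => true
                   | x :: _ => if pvDigit x then pvPairs l else false) := by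
  induction l with
  | nil => exact ⟨rfl, rfl⟩
  | cons x xs ih =>
    have h0 : pvLoopA (x :: xs) 0 = if x ∈ pvNumeros then pvLoopA xs 0 else pvLoopA xs 1 := by
      rw [pvLoopA]
      by_cases hx : x ∈ pvNumeros <;> simp [hx]
    have h1 : pvLoopA (x :: xs) 1 = if x ∈ pvNumeros then pvLoopA xs 0 else false := by
      rw [pvLoopA]
      by_cases hx : x ∈ pvNumeros <;> simp [hx]
    constructor
    · rw [h0, pvPairs_cons]
      by_cases hx : x ∈ pvNumeros
      · rw [if_pos hx, ih.1]
        cases xs with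
        | nil => simp [pvPairs]
        | cons y ys => simp [pvDigit_eq, hx]
      · rw [if_neg hx, ih.2]
        cases xs with
        | nil => rfl
        | cons y ys =>
          simp only [pvDigit_eq, hx, decide_eq_true_eq]
          by_cases hy : y ∈ pvNumeros <;> simp [hy]
    · rw [h1, pvPairs_cons]
      by_cases hx : x ∈ pvNumeros
      · rw [if_pos hx, ih.1]
        simp only [pvDigit_eq, hx, decide_true, if_true]
        cases xs with
        | nil => simp [pvPairs]
        | cons y ys => simp [pvDigit_eq, pvPairs_cons]
      · simp [hx, pvDigit_eq]

theorem pvGetLast_A (e : String) (h : e.toList ≠ []) :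
    PySem.Str.pyGet? e ((e.toList.length : Int) - 1) = some (e.toList.getLast h) := by
  have hlen : 0 < e.toList.length := List.length_pos_iff.mpr h
  have : ((e.toList.length : Int) - 1) = ((e.toList.length - 1 : Nat) : Int) := by omega
  rw [PySem.Str.pyGet?_eq, PySem.Chars.pyGet?_eq_listPyGet?, this,
      PySem.List.pyGet?_natCast]
  simp [List.getLast_eq_getElem]

theorem pvGetLast_B (e : String) (h : e.toList ≠ []) :
    PySem.Str.pyGet? e (-1) = some (e.toList.getLast h) := by
  rw [PySem.Str.pyGet?_eq, PySem.Chars.pyGet?_eq_listPyGet?, PySem.List.pyGet?_neg_one]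
  simp [List.getLast?_eq_some_getLast, h]

theorem validar_expresion_spec : Claim_equal_validar_expresion := by
  intro e _ hpre
  unfold Spec_validar_expresion validar_expresion validar_expresion_alt
  show (if pvLoopA e.toList 0 = true then
          match PySem.Str.pyGet? e ((e.toList.length : Int) - 1) with
          | none => false
          | some c => if c ∉ pvNumeros then false else true
        else false) = _
  rw [pvGetLast_A e hpre, pvGetLast_B e hpre]
  rw [(pvLoopA_zero_one e.toList).1]
  set c := e.toList.getLast hpre with hc
  show (if pvPairs e.toList then (if c ∉ pvNumeros then false else true) else false)
      = (if !pvDigit c then false else pvPairs e.toList)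
  by_cases hcn : c ∈ pvNumeros <;>
    simp [hcn, pvDigit_eq]
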